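-- pv_equiv track=rewrite | github.com/RossySpike/Proyecto_contrase-as | contraseñas.py | tiene_esp_carac
-- ===== SOURCE A (Python) =====
-- def tiene_esp_carac (palabra,valor):
--
--     for ciclo in range (0,len(palabra)):
--
--         if palabra[ciclo].isalnum() == False:#.isalnum() es una funcion que regresa un valor booleano si TODOS los elementos de una cadena son alfanumericos (a-z y 0-9) por lo que los unicos elementos que quedan por fuera son los caracteres especiales, que son los que queremos, es por esto que la condicion es que sea False
--             valor += 3
--
--             for ciclo in range(ciclo+1,len(palabra)):#aqui revisamos si hay mas carac. esp. en la cadena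
--
--                 if palabra[ciclo].isalnum() == False:
--                     valor += 2
--
--             break
--
--     return (valor)
-- ===== SOURCE B (Python) =====
-- def tiene_esp_carac(palabra, valor):
--     n = sum(1 for c in palabra if not c.isalnum())
--     if n:
--         valor += 2 * n + 1
--     return valor
-- ===== Notes on version B (the rewrite author's own statement) =====
-- stated objective: simpler
-- what changed: Replaces the find-first-then-nested-count-with-break loops by a single count of non-alphanumeric characters and the closed form valor + 2*n + 1 when n >= 1.
import Mathlib
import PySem

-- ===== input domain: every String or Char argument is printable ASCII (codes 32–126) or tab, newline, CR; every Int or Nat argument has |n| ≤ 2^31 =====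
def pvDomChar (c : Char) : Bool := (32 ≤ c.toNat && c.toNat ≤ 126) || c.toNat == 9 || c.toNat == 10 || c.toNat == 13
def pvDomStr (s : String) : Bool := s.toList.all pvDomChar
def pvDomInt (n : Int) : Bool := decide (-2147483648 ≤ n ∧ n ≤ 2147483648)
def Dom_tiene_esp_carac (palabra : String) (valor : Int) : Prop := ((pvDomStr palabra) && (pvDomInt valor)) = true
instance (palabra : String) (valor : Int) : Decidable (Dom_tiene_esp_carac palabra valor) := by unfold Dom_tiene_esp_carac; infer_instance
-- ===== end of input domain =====

-- B replaces A's find-first-special-then-nested-count-with-break loops by one count of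
-- non-alphanumeric characters plus the closed form valor + 2*n + 1 (objective: simpler).

-- ===== PORT A =====
-- inner loop: for the remaining characters, valor += 2 for each non-alphanumeric one
def pvA_inner (cs : List Char) (v : Int) : Int :=
  cs.foldl (fun acc c => if PySem.Chars.isalnum c = false then acc + 2 else acc) v

-- outer loop with break: scan until the first non-alphanumeric character
def pvA_outer : List Char → Int → Int
  | [], v => v
  | c :: rest, v =>
      if PySem.Chars.isalnum c = false then pvA_inner rest (v + 3)
      else pvA_outer rest v

def tiene_esp_carac (palabra : String) (valor : Int) : Int :=
  pvA_outer palabra.toList valor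

-- ===== PORT B =====
def tiene_esp_carac_alt (palabra : String) (valor : Int) : Int :=
  let n : Int := (palabra.toList.countP (fun c => !PySem.Chars.isalnum c) : Nat)
  if n ≠ 0 then valor + 2 * n + 1 else valor

-- ===== PRECONDITION & SPEC =====
def Spec_tiene_esp_carac (palabra : String) (valor : Int) (out : Int) : Prop := out = tiene_esp_carac_alt palabra valor
instance (palabra : String) (valor : Int) (out : Int) : Decidable (Spec_tiene_esp_carac palabra valor out) := by unfold Spec_tiene_esp_carac; infer_instance

-- ===== CLAIM (what is proved, stated in full; the proofs are below) =====
def Claim_equal_tiene_esp_carac : Prop := ∀ (palabra : String) (valor : Int), Dom_tiene_esp_carac palabra valor → Spec_tiene_esp_carac palabra valor (tiene_esp_carac palabra valor)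

-- ===== LEMMAS AND PROOFS =====
theorem pvA_inner_eq (cs : List Char) (v : Int) :
    pvA_inner cs v = v + 2 * (cs.countP (fun c => !PySem.Chars.isalnum c) : Nat) := by
  induction cs generalizing v with
  | nil => simp [pvA_inner]
  | cons c rest ih =>
      simp only [pvA_inner, List.foldl_cons] at *
      by_cases h : PySem.Chars.isalnum c = false <;>
        simp [h, ih, List.countP_cons] <;> push_cast <;> ring

theorem pvA_outer_eq (cs : List Char) (v : Int) :
    pvA_outer cs v =
      let n : Int := (cs.countP (fun c => !PySem.Chars.isalnum c) : Nat)
      if n ≠ 0 then v + 2 * n + 1 else v := by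
  induction cs generalizing v with
  | nil => simp [pvA_outer]
  | cons c rest ih =>
      simp only [pvA_outer]
      by_cases h : PySem.Chars.isalnum c = false
      · simp only [if_pos h, pvA_inner_eq, List.countP_cons, h]
        simp
        push_cast
        omega
      · simp only [if_neg h, ih, List.countP_cons]
        have hb : (!PySem.Chars.isalnum c) = false := by
          cases hh : PySem.Chars.isalnum c <;> simp_all
        simp [hb]

-- ===== VERDICT (by name: the statement is the Claim_ definition above) =====
theorem tiene_esp_carac_spec : Claim_equal_tiene_esp_carac := by
  intro palabra valor _
  unfold Spec_tiene_esp_carac tiene_esp_carac tiene_esp_carac_alt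
  exact pvA_outer_eq palabra.toList valor
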